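-- pv_equiv track=rewrite | github.com/Kiatypie/PFB-igp | profits_and_loss.py | analyze_trend_basic_manual
-- ===== SOURCE A (Python) =====
-- def analyze_trend_basic_manual(net_profit_changes, data):
--     '''
--     - Analyses the trend in net profit changes to see if it has a
--       decreasing, increasing, or fluctuating trend
--     - Increasing or decreasing trend: States the trend with highest increase/decrease amount and the day
--     - Fluctuating trend: States the trend, highlighting the top 3 deficits.
--     '''
--     increasing = True
--     decreasing = True
--
--     for change in net_profit_changes:
--         if change <= 0:
--             increasing = False
--         if change >= 0:
--             decreasing = False
--
--     if increasing:
--         max_increase = max(net_profit_changes)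
--         day_index = net_profit_changes.index(max_increase)
--         day_of_max_increase = data[day_index + 1][0]
--         return f"Increasing trend. Highest increase: SGD {max_increase} on Day {day_of_max_increase}."
--     elif decreasing:
--         max_decrease = min(net_profit_changes)
--         day_index = net_profit_changes.index(max_decrease)
--         day_of_max_decrease = data[day_index + 1][0]
--         return f"Decreasing trend. Highest decrease: SGD {max_decrease} on Day {day_of_max_decrease}."
--     else:
--         deficits = [(change, data[change_index + 1][0]) for change_index, change in enumerate(net_profit_changes) if change < 0]
--
--         for deficit_index in range(len(deficits)):
--             for next_index in range(len(deficits) - deficit_index - 1):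
--                 if deficits[next_index][0] > deficits[next_index + 1][0]:
--                     deficits[next_index], deficits[next_index + 1] = deficits[next_index + 1], deficits[next_index]
--         top_3_deficits = deficits[:3]
--         return f"Fluctuating trend. Top 3 deficits (Amount in SGD, Day): {top_3_deficits}"
-- ===== SOURCE B (Python) =====
-- def _insert3(buf, item):
--     # keep buf sorted ascending by amount (stable: equal amounts keep arrival order),
--     # capped at 3 entries
--     if not buf or item[0] < buf[0][0]:
--         return ([item] + buf)[:3]
--     return (buf[:1] + _insert3(buf[1:], item))[:3]
--
--
-- def analyze_trend_basic_manual(net_profit_changes, data):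
--     if all(c > 0 for c in net_profit_changes):
--         amount = day_index = None
--         for j, c in enumerate(net_profit_changes):
--             if amount is None or c > amount:
--                 amount, day_index = c, j
--         return f"Increasing trend. Highest increase: SGD {amount} on Day {data[day_index + 1][0]}."
--     if all(c < 0 for c in net_profit_changes):
--         amount = day_index = None
--         for j, c in enumerate(net_profit_changes):
--             if amount is None or c < amount:
--                 amount, day_index = c, j
--         return f"Decreasing trend. Highest decrease: SGD {amount} on Day {data[day_index + 1][0]}."
--     top3 = []
--     for j, c in enumerate(net_profit_changes):
--         if c < 0:
--             top3 = _insert3(top3, (c, data[j + 1][0]))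
--     return f"Fluctuating trend. Top 3 deficits (Amount in SGD, Day): {top3}"
-- ===== Notes on version B (the rewrite author's own statement) =====
-- stated objective: alternative
-- what changed: B replaces A's build-all-deficits-then-bubble-sort with a single streaming pass keeping a stable, amount-sorted buffer capped at 3 entries, and replaces A's max()/min() plus separate .index() scan by one argmax/argmin pass tracking the first extremal value and its day index.
import Mathlib
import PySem

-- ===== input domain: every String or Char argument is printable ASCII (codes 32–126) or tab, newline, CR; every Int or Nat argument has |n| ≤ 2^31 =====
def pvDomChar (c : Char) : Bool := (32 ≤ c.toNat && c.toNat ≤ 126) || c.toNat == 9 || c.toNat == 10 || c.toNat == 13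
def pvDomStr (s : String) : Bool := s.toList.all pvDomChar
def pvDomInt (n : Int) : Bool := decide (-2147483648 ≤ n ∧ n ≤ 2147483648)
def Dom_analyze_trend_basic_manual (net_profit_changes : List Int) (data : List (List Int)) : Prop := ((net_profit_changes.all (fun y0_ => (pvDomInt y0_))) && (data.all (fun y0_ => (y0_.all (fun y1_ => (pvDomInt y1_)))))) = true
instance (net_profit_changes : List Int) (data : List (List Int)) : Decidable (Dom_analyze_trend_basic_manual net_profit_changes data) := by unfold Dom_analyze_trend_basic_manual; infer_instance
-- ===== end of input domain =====

-- B replaces A's build-all-deficits-then-bubble-sort by a single streaming pass keeping a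
-- stable, length-3 sorted buffer, and replaces max()/min()+.index() by one argmax/argmin pass
-- (objective: alternative). Return-value equivalence; neither version mutates its arguments.

-- ===== PORT A =====

-- data[i][0], total via defaults; exact wherever Pre_ holds (index in range, row nonempty)
def pvDay (data : List (List Int)) (i : Int) : Int :=
  (PySem.List.pyGet? ((PySem.List.pyGet? data i).getD []) 0).getD 0

-- repr of a list of int pairs, as Python's f-string prints top_3_deficits (ASCII-exact)
def pvFmtPair (p : Int × Int) : String :=
  "(" ++ PySem.Int.toStr p.1 ++ ", " ++ PySem.Int.toStr p.2 ++ ")"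
def pvFmtList (l : List (Int × Int)) : String :=
  "[" ++ String.intercalate ", " (l.map pvFmtPair) ++ "]"

-- one compare-and-swap of deficits[j], deficits[j+1] (indices are in range when used)
def pvSwapStep (l : List (Int × Int)) (j : Nat) : List (Int × Int) :=
  if (l.getD j (0, 0)).1 > (l.getD (j + 1) (0, 0)).1 then
    (l.set j (l.getD (j + 1) (0, 0))).set (j + 1) (l.getD j (0, 0))
  else l

def analyze_trend_basic_manual (net_profit_changes : List Int) (data : List (List Int)) : String :=
  let flags := net_profit_changes.foldl
    (fun (p : Bool × Bool) c => (if c ≤ 0 then false else p.1, if c ≥ 0 then false else p.2))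
    (true, true)
  if flags.1 then
    let mx := (PySem.List.max? net_profit_changes (fun y => y)).getD 0
    let di : Int := ((PySem.List.index? net_profit_changes mx).getD 0 : Nat)
    "Increasing trend. Highest increase: SGD " ++ PySem.Int.toStr mx ++ " on Day " ++
      PySem.Int.toStr (pvDay data (di + 1)) ++ "."
  else if flags.2 then
    let mn := (PySem.List.min? net_profit_changes (fun y => y)).getD 0
    let di : Int := ((PySem.List.index? net_profit_changes mn).getD 0 : Nat)
    "Decreasing trend. Highest decrease: SGD " ++ PySem.Int.toStr mn ++ " on Day " ++
      PySem.Int.toStr (pvDay data (di + 1)) ++ "."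
  else
    let deficits := (PySem.List.enumerate net_profit_changes).foldl
      (fun acc ic => if ic.2 < 0 then acc ++ [(ic.2, pvDay data (ic.1 + 1))] else acc) []
    let n := deficits.length
    let sorted := (List.range n).foldl
      (fun st i => (List.range (n - i - 1)).foldl pvSwapStep st) deficits
    "Fluctuating trend. Top 3 deficits (Amount in SGD, Day): " ++ pvFmtList (sorted.take 3)

-- ===== PORT B =====

-- _insert3: stable sorted insert into a buffer capped at 3
def pvIns3 (buf : List (Int × Int)) (x : Int × Int) : List (Int × Int) :=
  match buf with
  | [] => [x]
  | y :: ys => if x.1 < y.1 then (x :: y :: ys).take 3 else (y :: pvIns3 ys x).take 3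

def analyze_trend_basic_manual_alt (net_profit_changes : List Int) (data : List (List Int)) : String :=
  if net_profit_changes.all (fun c => decide (0 < c)) then
    match (PySem.List.enumerate net_profit_changes).foldl
        (fun st (jc : Int × Int) =>
          match st with
          | none => some (jc.2, jc.1)
          | some ai => if jc.2 > ai.1 then some (jc.2, jc.1) else some ai)
        none with
    | some ai =>
      "Increasing trend. Highest increase: SGD " ++ PySem.Int.toStr ai.1 ++ " on Day " ++
        PySem.Int.toStr (pvDay data (ai.2 + 1)) ++ "."
    | none => ""   -- unreachable under Pre_ (Python B raises on an empty list, as A does)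
  else if net_profit_changes.all (fun c => decide (c < 0)) then
    match (PySem.List.enumerate net_profit_changes).foldl
        (fun st (jc : Int × Int) =>
          match st with
          | none => some (jc.2, jc.1)
          | some ai => if jc.2 < ai.1 then some (jc.2, jc.1) else some ai)
        none with
    | some ai =>
      "Decreasing trend. Highest decrease: SGD " ++ PySem.Int.toStr ai.1 ++ " on Day " ++
        PySem.Int.toStr (pvDay data (ai.2 + 1)) ++ "."
    | none => ""
  else
    let top3 := (PySem.List.enumerate net_profit_changes).foldl
      (fun buf jc => if jc.2 < 0 then pvIns3 buf (jc.2, pvDay data (jc.1 + 1)) else buf) []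
    "Fluctuating trend. Top 3 deficits (Amount in SGD, Day): " ++ pvFmtList top3

-- ===== PRECONDITION & SPEC =====

-- data[j] exists and is a nonempty row
def pvRowOK (data : List (List Int)) (j : Nat) : Bool :=
  decide (j < data.length) && decide (data.getD j [] ≠ [])

-- Pre_ = exactly the inputs where the Python A returns: a nonempty change list (max([]) raises
-- ValueError on []), and every data row the taken branch indexes exists and is nonempty
-- (otherwise data[i+1][0] raises IndexError).
def Pre_analyze_trend_basic_manual (net_profit_changes : List Int) (data : List (List Int)) : Prop :=
  net_profit_changes ≠ [] ∧
  (if net_profit_changes.all (fun c => decide (0 < c)) then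
    pvRowOK data (((PySem.List.index? net_profit_changes
      ((PySem.List.max? net_profit_changes (fun y => y)).getD 0)).getD 0) + 1) = true
  else if net_profit_changes.all (fun c => decide (c < 0)) then
    pvRowOK data (((PySem.List.index? net_profit_changes
      ((PySem.List.min? net_profit_changes (fun y => y)).getD 0)).getD 0) + 1) = true
  else
    ∀ i < net_profit_changes.length, net_profit_changes.getD i 0 < 0 → pvRowOK data (i + 1) = true)

instance (net_profit_changes : List Int) (data : List (List Int)) : Decidable (Pre_analyze_trend_basic_manual net_profit_changes data) := by unfold Pre_analyze_trend_basic_manual; infer_instance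

def pvWitness_analyze_trend_basic_manual : List Int × List (List Int) := ([1, -2], [[1], [2], [3]])

def Spec_analyze_trend_basic_manual (net_profit_changes : List Int) (data : List (List Int)) (out : String) : Prop := out = analyze_trend_basic_manual_alt net_profit_changes data
instance (net_profit_changes : List Int) (data : List (List Int)) (out : String) : Decidable (Spec_analyze_trend_basic_manual net_profit_changes data out) := by unfold Spec_analyze_trend_basic_manual; infer_instance

-- ===== CLAIM (what is proved, stated in full; the proofs are below) =====
def Claim_equal_analyze_trend_basic_manual : Prop := ∀ (net_profit_changes : List Int) (data : List (List Int)), Dom_analyze_trend_basic_manual net_profit_changes data → Pre_analyze_trend_basic_manual net_profit_changes data → Spec_analyze_trend_basic_manual net_profit_changes data (analyze_trend_basic_manual net_profit_changes data)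

-- ===== LEMMAS AND PROOFS =====

-- ---- the trend flags ----

lemma pvFoldFlag1 (l : List Int) (b : Bool) :
    l.foldl (fun ok c => if c ≤ 0 then false else ok) b = (b && l.all (fun c => decide (0 < c))) := by
  induction l generalizing b with
  | nil => simp
  | cons c t ih =>
    simp only [List.foldl_cons, List.all_cons, ih]
    by_cases h : c ≤ 0
    · simp [h, show ¬ (0 < c) by omega]
    · simp [h, show (0 < c) by omega, Bool.and_assoc]

lemma pvFoldFlag2 (l : List Int) (b : Bool) :
    l.foldl (fun ok c => if c ≥ 0 then false else ok) b = (b && l.all (fun c => decide (c < 0))) := by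
  induction l generalizing b with
  | nil => simp
  | cons c t ih =>
    simp only [List.foldl_cons, List.all_cons, ih]
    by_cases h : c ≥ 0
    · simp [h, show ¬ (c < 0) by omega]
    · simp [h, show (c < 0) by omega, Bool.and_assoc]

-- ---- argmax / argmin single pass ----

lemma pvArgmaxFold (t : List Int) (a i s : Int) :
    (PySem.List.enumerate t s).foldl
      (fun st (jc : Int × Int) =>
        match st with
        | none => some (jc.2, jc.1)
        | some ai => if jc.2 > ai.1 then some (jc.2, jc.1) else some ai)
      (some (a, i)) =
    some (if t.foldl max a = a then (a, i)
          else (t.foldl max a, s + (t.idxOf (t.foldl max a) : Int))) := by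
  induction t generalizing a i s with
  | nil => simp [PySem.List.enumerate_nil]
  | cons c t ih =>
    rw [PySem.List.enumerate_cons, List.foldl_cons]
    by_cases hca : a < c
    · show (PySem.List.enumerate t (s + 1)).foldl _ (if a < c then some (c, s) else some (a, i)) = _
      rw [if_pos hca, ih]
      have hmax : max a c = c := max_eq_right hca.le
      have hM : c ≤ t.foldl max c := (PySem.List.le_foldl_max t c).1
      simp only [List.foldl_cons, hmax]
      by_cases h2 : t.foldl max c = c
      · rw [if_pos h2, h2, if_neg (by omega)]
        simp [List.idxOf_cons]
      · rw [if_neg h2, if_neg (by omega)]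
        have hbeq : (c == t.foldl max c) = false := by
          simp only [beq_eq_false_iff_ne, ne_eq]; omega
        simp only [List.idxOf_cons, hbeq, cond_false]
        simp only [Option.some.injEq, Prod.mk.injEq]
        refine ⟨by trivial, by push_cast; ring⟩
    · show (PySem.List.enumerate t (s + 1)).foldl _ (if a < c then some (c, s) else some (a, i)) = _
      rw [if_neg hca, ih]
      have hmax : max a c = a := max_eq_left (by omega)
      simp only [List.foldl_cons, hmax]
      by_cases h2 : t.foldl max a = a
      · rw [if_pos h2, if_pos h2]
      · rw [if_neg h2, if_neg h2]
        have hM : a ≤ t.foldl max a := (PySem.List.le_foldl_max t a).1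
        have hbeq : (c == t.foldl max a) = false := by
          simp only [beq_eq_false_iff_ne, ne_eq]; omega
        simp only [List.idxOf_cons, hbeq, cond_false]
        simp only [Option.some.injEq, Prod.mk.injEq]
        refine ⟨by trivial, by push_cast; ring⟩

lemma pvArgminFold (t : List Int) (a i s : Int) :
    (PySem.List.enumerate t s).foldl
      (fun st (jc : Int × Int) =>
        match st with
        | none => some (jc.2, jc.1)
        | some ai => if jc.2 < ai.1 then some (jc.2, jc.1) else some ai)
      (some (a, i)) =
    some (if t.foldl min a = a then (a, i)
          else (t.foldl min a, s + (t.idxOf (t.foldl min a) : Int))) := by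
  induction t generalizing a i s with
  | nil => simp [PySem.List.enumerate_nil]
  | cons c t ih =>
    rw [PySem.List.enumerate_cons, List.foldl_cons]
    by_cases hca : c < a
    · show (PySem.List.enumerate t (s + 1)).foldl _ (if c < a then some (c, s) else some (a, i)) = _
      rw [if_pos hca, ih]
      have hmax : min a c = c := min_eq_right hca.le
      have hM : t.foldl min c ≤ c := (PySem.List.foldl_min_le t c).1
      simp only [List.foldl_cons, hmax]
      by_cases h2 : t.foldl min c = c
      · rw [if_pos h2, h2, if_neg (by omega)]
        simp [List.idxOf_cons]
      · rw [if_neg h2, if_neg (by omega)]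
        have hbeq : (c == t.foldl min c) = false := by
          simp only [beq_eq_false_iff_ne, ne_eq]; omega
        simp only [List.idxOf_cons, hbeq, cond_false]
        simp only [Option.some.injEq, Prod.mk.injEq]
        refine ⟨by trivial, by push_cast; ring⟩
    · show (PySem.List.enumerate t (s + 1)).foldl _ (if c < a then some (c, s) else some (a, i)) = _
      rw [if_neg hca, ih]
      have hmax : min a c = a := min_eq_left (by omega)
      simp only [List.foldl_cons, hmax]
      by_cases h2 : t.foldl min a = a
      · rw [if_pos h2, if_pos h2]
      · rw [if_neg h2, if_neg h2]
        have hM : t.foldl min a ≤ a := (PySem.List.foldl_min_le t a).1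
        have hbeq : (c == t.foldl min a) = false := by
          simp only [beq_eq_false_iff_ne, ne_eq]; omega
        simp only [List.idxOf_cons, hbeq, cond_false]
        simp only [Option.some.injEq, Prod.mk.injEq]
        refine ⟨by trivial, by push_cast; ring⟩

lemma pvIndexMem {l : List Int} {v : Int} (h : v ∈ l) :
    PySem.List.index? l v = some (l.idxOf v) := by
  induction l with
  | nil => simp at h
  | cons x t ih =>
    by_cases hx : x = v
    · subst hx
      rw [PySem.List.index?_cons_self]
      simp [List.idxOf_cons]
    · have hv : v ∈ t := by
        rcases List.mem_cons.mp h with h' | h'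
        · exact absurd h'.symm hx
        · exact h'
      rw [PySem.List.index?_cons_of_ne t hx, ih hv]
      have hbeq : (x == v) = false := by simp [hx]
      simp [List.idxOf_cons, hbeq]

lemma pvArgmaxFoldCons (x : Int) (t : List Int) (s : Int) :
    (PySem.List.enumerate (x :: t) s).foldl
      (fun st (jc : Int × Int) =>
        match st with
        | none => some (jc.2, jc.1)
        | some ai => if jc.2 > ai.1 then some (jc.2, jc.1) else some ai) none
    = some (if t.foldl max x = x then (x, s)
            else (t.foldl max x, s + 1 + (t.idxOf (t.foldl max x) : Int))) := by
  rw [PySem.List.enumerate_cons, List.foldl_cons]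
  show (PySem.List.enumerate t (s + 1)).foldl _ (some (x, s)) = _
  rw [pvArgmaxFold t x s (s + 1)]

lemma pvArgminFoldCons (x : Int) (t : List Int) (s : Int) :
    (PySem.List.enumerate (x :: t) s).foldl
      (fun st (jc : Int × Int) =>
        match st with
        | none => some (jc.2, jc.1)
        | some ai => if jc.2 < ai.1 then some (jc.2, jc.1) else some ai) none
    = some (if t.foldl min x = x then (x, s)
            else (t.foldl min x, s + 1 + (t.idxOf (t.foldl min x) : Int))) := by
  rw [PySem.List.enumerate_cons, List.foldl_cons]
  show (PySem.List.enumerate t (s + 1)).foldl _ (some (x, s)) = _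
  rw [pvArgminFold t x s (s + 1)]

-- ---- one bubble pass, functionally ----

def pvBp1 : List (Int × Int) → List (Int × Int)
  | [] => []
  | [a] => [a]
  | a :: b :: t => if a.1 > b.1 then b :: pvBp1 (a :: t) else a :: pvBp1 (b :: t)

def pvInsEnd : List (Int × Int) → (Int × Int) → List (Int × Int)
  | [], x => [x]
  | y :: ys, x => if x.1 < y.1 then x :: y :: ys else y :: pvInsEnd ys x

def pvIsort (l : List (Int × Int)) : List (Int × Int) := l.foldl pvInsEnd []

lemma pvBp1_length (l : List (Int × Int)) : (pvBp1 l).length = l.length := by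
  induction l using pvBp1.induct with
  | case1 => simp [pvBp1]
  | case2 a => simp [pvBp1]
  | case3 a b t h ih => rw [pvBp1, if_pos h]; simp [ih]
  | case4 a b t h ih => rw [pvBp1, if_neg (by omega)]; simp [ih]

lemma pvBp1_perm (l : List (Int × Int)) : (pvBp1 l).Perm l := by
  induction l using pvBp1.induct with
  | case1 => simp [pvBp1]
  | case2 a => simp [pvBp1]
  | case3 a b t h ih =>
    rw [pvBp1, if_pos h]
    exact (ih.cons b).trans (List.Perm.swap a b t)
  | case4 a b t h ih =>
    rw [pvBp1, if_neg h]
    exact ih.cons a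

lemma pvGetLastD_ne {α : Type} (X : List α) (d d' : α) (h : X ≠ []) :
    X.getLastD d = X.getLastD d' := by
  cases X with
  | nil => exact absurd rfl h
  | cons a t => rw [List.getLastD_cons, List.getLastD_cons]

lemma pvDropLast_getLastD {α : Type} (X : List α) (d : α) (h : X ≠ []) :
    X.dropLast ++ [X.getLastD d] = X := by
  cases X with
  | nil => exact absurd rfl h
  | cons y ys =>
    rw [List.getLastD_cons, ← List.getLast_eq_getLastD (by simp), List.dropLast_concat_getLast]

lemma pvBp1_ne_nil (a : Int × Int) (t : List (Int × Int)) : pvBp1 (a :: t) ≠ [] := by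
  have h := pvBp1_length (a :: t)
  intro hc; rw [hc] at h; simp at h

lemma pvBp1_last_ge (a : Int × Int) (t : List (Int × Int)) :
    ∀ e ∈ pvBp1 (a :: t), e.1 ≤ ((pvBp1 (a :: t)).getLastD (0, 0)).1 := by
  induction t generalizing a with
  | nil => intro e he; simp [pvBp1] at he ⊢; simp [he]
  | cons b r ih =>
    intro e he
    by_cases hab : a.1 > b.1
    · rw [pvBp1, if_pos hab] at he ⊢
      rw [List.getLastD_cons, pvGetLastD_ne _ _ (0, 0) (pvBp1_ne_nil a r)]
      rcases List.mem_cons.mp he with rfl | he'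
      · have ha : a ∈ pvBp1 (a :: r) := ((pvBp1_perm (a :: r)).mem_iff).mpr (by simp)
        have := ih a a ha
        omega
      · exact ih a e he'
    · rw [pvBp1, if_neg hab] at he ⊢
      rw [List.getLastD_cons, pvGetLastD_ne _ _ (0, 0) (pvBp1_ne_nil b r)]
      rcases List.mem_cons.mp he with rfl | he'
      · have hb : b ∈ pvBp1 (b :: r) := ((pvBp1_perm (b :: r)).mem_iff).mpr (by simp)
        have := ih b b hb
        omega
      · exact ih b e he'

lemma pvBp1_append_last (a : Int × Int) (t : List (Int × Int)) (b : Int × Int) :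
    pvBp1 ((a :: t) ++ [b]) =
      if ((pvBp1 (a :: t)).getLastD (0, 0)).1 > b.1 then
        (pvBp1 (a :: t)).dropLast ++ [b, (pvBp1 (a :: t)).getLastD (0, 0)]
      else pvBp1 (a :: t) ++ [b] := by
  induction t generalizing a with
  | nil =>
    have hA : pvBp1 [a] = [a] := by simp [pvBp1]
    have hB : pvBp1 [b] = [b] := by simp [pvBp1]
    show pvBp1 [a, b] = _
    conv_lhs => rw [pvBp1]
    rw [hA, hB, show ([a] : List (Int × Int)).getLastD (0, 0) = a from rfl,
      show ([a] : List (Int × Int)).dropLast = [] from rfl]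
    split_ifs <;> rfl
  | cons c r ih =>
    have hne_ar := pvBp1_ne_nil a r
    have hne_cr := pvBp1_ne_nil c r
    show pvBp1 (a :: c :: (r ++ [b])) = _
    rw [pvBp1]
    by_cases hac : a.1 > c.1
    · rw [if_pos hac]
      rw [show a :: (r ++ [b]) = (a :: r) ++ [b] from rfl, ih a]
      conv_rhs => rw [pvBp1, if_pos hac]
      rw [List.getLastD_cons, pvGetLastD_ne (pvBp1 (a :: r)) c (0, 0) hne_ar,
        List.dropLast_cons_of_ne_nil hne_ar]
      split_ifs <;> simp
    · rw [if_neg hac]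
      rw [show c :: (r ++ [b]) = (c :: r) ++ [b] from rfl, ih c]
      conv_rhs => rw [pvBp1, if_neg hac]
      rw [List.getLastD_cons, pvGetLastD_ne (pvBp1 (c :: r)) a (0, 0) hne_cr,
        List.dropLast_cons_of_ne_nil hne_cr]
      split_ifs <;> simp

-- ---- the indexed pass equals pvBp1 on the prefix ----

lemma pvPassEq (k : Nat) (l : List (Int × Int)) (h : k < l.length) :
    (List.range k).foldl pvSwapStep l = pvBp1 (l.take (k + 1)) ++ l.drop (k + 1) := by
  induction k with
  | zero =>
    cases l with
    | nil => exact absurd h (by simp)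
    | cons x t => simp [pvBp1]
  | succ k ih =>
    have hk : k < l.length := by omega
    rw [List.range_succ, List.foldl_append, List.foldl_cons, List.foldl_nil, ih hk]
    have hlen_take : (l.take (k + 1)).length = k + 1 := by simp; omega
    have hQlen : (pvBp1 (l.take (k + 1))).length = k + 1 := by rw [pvBp1_length, hlen_take]
    have hQne : pvBp1 (l.take (k + 1)) ≠ [] := by
      intro hc; rw [hc] at hQlen; simp at hQlen
    set Q := pvBp1 (l.take (k + 1)) with hQdef
    set q := Q.getLastD (0, 0) with hqdef
    have hsplit : Q = Q.dropLast ++ [q] := (pvDropLast_getLastD Q (0, 0) hQne).symm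
    have hQDlen : Q.dropLast.length = k := by rw [List.length_dropLast, hQlen]; omega
    have hD : l.drop (k + 1) = l[k + 1] :: l.drop (k + 2) := List.drop_eq_getElem_cons h
    have hX : Q ++ l.drop (k + 1) = Q.dropLast ++ q :: l[k + 1] :: l.drop (k + 2) := by
      rw [hD]; conv_lhs => rw [hsplit]
      simp
    rw [hX]
    have hg1 : (Q.dropLast ++ q :: l[k + 1] :: l.drop (k + 2)).getD k (0, 0) = q := by
      rw [List.getD_eq_getElem?_getD, List.getElem?_append_right (by omega),
        show k - Q.dropLast.length = 0 by omega]
      rfl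
    have hg2 : (Q.dropLast ++ q :: l[k + 1] :: l.drop (k + 2)).getD (k + 1) (0, 0) = l[k + 1] := by
      rw [List.getD_eq_getElem?_getD, List.getElem?_append_right (by omega),
        show k + 1 - Q.dropLast.length = 1 by omega]
      rfl
    have hset : ((Q.dropLast ++ q :: l[k + 1] :: l.drop (k + 2)).set k (l[k + 1])).set (k + 1) q
        = Q.dropLast ++ l[k + 1] :: q :: l.drop (k + 2) := by
      rw [List.set_append, if_neg (by omega), show k - Q.dropLast.length = 0 by omega]
      rw [List.set_append, if_neg (by omega), show k + 1 - Q.dropLast.length = 1 by omega]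
      rfl
    have htake : l.take (k + 2) = l.take (k + 1) ++ [l[k + 1]] := by
      rw [List.take_succ]
      simp [List.getElem?_eq_getElem h]
    cases htk : l.take (k + 1) with
    | nil => rw [htk] at hlen_take; simp at hlen_take
    | cons a t =>
      rw [htake, htk, pvBp1_append_last a t (l[k + 1])]
      rw [htk] at hQdef
      rw [← hQdef, ← hqdef]
      simp only [pvSwapStep, hg1, hg2, hset]
      split_ifs with hcond
      · simp
      · conv_rhs => rw [hsplit]
        simp

lemma pvPassLength (k : Nat) (l : List (Int × Int)) (h : k < l.length) :
    ((List.range k).foldl pvSwapStep l).length = l.length := by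
  rw [pvPassEq k l h, List.length_append, pvBp1_length, List.length_take, List.length_drop]
  omega

lemma pvPassAppend (k : Nat) (p s : List (Int × Int)) (h : k < p.length) :
    (List.range k).foldl pvSwapStep (p ++ s) = (List.range k).foldl pvSwapStep p ++ s := by
  rw [pvPassEq k (p ++ s) (by rw [List.length_append]; omega), pvPassEq k p h,
    List.take_append_of_le_length (by omega), List.drop_append_of_le_length (by omega),
    List.append_assoc]

-- ---- insertion sort facts ----

lemma pvInsEnd_perm (s : List (Int × Int)) (x : Int × Int) : (pvInsEnd s x).Perm (x :: s) := by
  induction s with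
  | nil => exact List.Perm.refl _
  | cons y ys ih =>
    rw [pvInsEnd]
    split_ifs with h
    · exact List.Perm.refl _
    · exact (ih.cons y).trans (List.Perm.swap x y ys)

lemma pvFoldInsEnd_perm (l acc : List (Int × Int)) :
    (l.foldl pvInsEnd acc).Perm (acc ++ l) := by
  induction l generalizing acc with
  | nil => simp
  | cons x t ih =>
    rw [List.foldl_cons]
    refine (ih (pvInsEnd acc x)).trans ?_
    exact (((pvInsEnd_perm acc x).append_right t).trans List.perm_middle.symm)

lemma pvIsort_perm (l : List (Int × Int)) : (pvIsort l).Perm l := by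
  simpa using pvFoldInsEnd_perm l []

lemma pvInsEnd_comm (s : List (Int × Int)) (x y : Int × Int) (h : y.1 < x.1) :
    pvInsEnd (pvInsEnd s x) y = pvInsEnd (pvInsEnd s y) x := by
  induction s with
  | nil => simp [pvInsEnd, h, show ¬ x.1 < y.1 by omega]
  | cons a s ih =>
    by_cases h1 : x.1 < a.1
    · have h2 : y.1 < a.1 := by omega
      simp [pvInsEnd, h1, h2, h, show ¬ x.1 < y.1 by omega]
    · by_cases h2 : y.1 < a.1
      · simp [pvInsEnd, h1, h2, show ¬ x.1 < y.1 by omega]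
      · simp [pvInsEnd, h1, h2, ih]

lemma pvIsort_bp1 (l : List (Int × Int)) (acc : List (Int × Int)) :
    (pvBp1 l).foldl pvInsEnd acc = l.foldl pvInsEnd acc := by
  induction l using pvBp1.induct generalizing acc with
  | case1 => simp [pvBp1]
  | case2 a => simp [pvBp1]
  | case3 a b t h ih =>
    rw [pvBp1, if_pos h, List.foldl_cons, ih, List.foldl_cons, List.foldl_cons,
      List.foldl_cons, ← pvInsEnd_comm acc a b h]
  | case4 a b t h ih =>
    rw [pvBp1, if_neg (by omega), List.foldl_cons, ih, List.foldl_cons, List.foldl_cons,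
      List.foldl_cons]

lemma pvInsEnd_all_le (s : List (Int × Int)) (x : Int × Int) (h : ∀ e ∈ s, ¬ x.1 < e.1) :
    pvInsEnd s x = s ++ [x] := by
  induction s with
  | nil => rfl
  | cons y ys ih =>
    rw [pvInsEnd, if_neg (h y (by simp)), ih (fun e he => h e (by simp [he]))]
    rfl

-- ---- bubble sort = stable insertion sort ----

lemma pvFoldPassAppend (L : List Nat) (q s : List (Int × Int)) (h : ∀ i ∈ L, i < q.length) :
    L.foldl (fun st j => (List.range j).foldl pvSwapStep st) (q ++ s)
      = L.foldl (fun st j => (List.range j).foldl pvSwapStep st) q ++ s := by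
  induction L generalizing q with
  | nil => rfl
  | cons j L ih =>
    rw [List.foldl_cons, List.foldl_cons, pvPassAppend j q s (h j (by simp))]
    exact ih ((List.range j).foldl pvSwapStep q)
      (fun i hi => by rw [pvPassLength j q (h j (by simp))]; exact h i (by simp [hi]))

lemma pvBubbleEq (l : List (Int × Int)) :
    (List.range l.length).foldl
      (fun st i => (List.range (l.length - i - 1)).foldl pvSwapStep st) l = pvIsort l := by
  induction hn : l.length using Nat.strong_induction_on generalizing l with
  | _ n ih =>
    cases l with
    | nil =>
      have h0 : n = 0 := by simpa using hn.symm
      subst h0; rfl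
    | cons a t =>
      simp only [List.length_cons] at hn ⊢
      subst hn
      rw [List.range_succ_eq_map, List.foldl_cons]
      rw [show t.length + 1 - 0 - 1 = t.length by omega]
      have hpass : (List.range t.length).foldl pvSwapStep (a :: t) = pvBp1 (a :: t) := by
        rw [pvPassEq t.length (a :: t) (by simp),
          List.take_of_length_le (by simp), List.drop_of_length_le (by simp), List.append_nil]
      rw [hpass, List.foldl_map]
      simp only [show ∀ i : Nat, t.length + 1 - (i + 1) - 1 = t.length - i - 1 from
        fun i => by omega]
      have hBne := pvBp1_ne_nil a t
      have hBlen : (pvBp1 (a :: t)).length = t.length + 1 := by rw [pvBp1_length]; simp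
      have hsplit := (pvDropLast_getLastD (pvBp1 (a :: t)) (0, 0) hBne).symm
      have hQDlen : (pvBp1 (a :: t)).dropLast.length = t.length := by
        rw [List.length_dropLast, hBlen]; omega
      conv_lhs => rw [hsplit]
      rw [← List.foldl_map (f := fun i : Nat => t.length - i - 1)
        (g := fun (st : List (Int × Int)) j => (List.range j).foldl pvSwapStep st)]
      rw [pvFoldPassAppend _ _ _ (by
        intro i hi
        simp only [List.mem_map, List.mem_range] at hi
        obtain ⟨j, hj, rfl⟩ := hi
        rw [hQDlen]; omega)]
      rw [List.foldl_map]
      rw [show t.length = (pvBp1 (a :: t)).dropLast.length from hQDlen.symm]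
      rw [ih (pvBp1 (a :: t)).dropLast.length (by rw [hQDlen]; omega) _ rfl]
      have h1 : pvIsort (a :: t) = (pvBp1 (a :: t)).foldl pvInsEnd [] :=
        (pvIsort_bp1 (a :: t) []).symm
      rw [h1]
      conv_rhs => rw [hsplit]
      rw [List.foldl_append, List.foldl_cons, List.foldl_nil]
      rw [pvInsEnd_all_le _ _ (by
        intro e he
        have he2 : e ∈ (pvBp1 (a :: t)).dropLast :=
          (pvIsort_perm (pvBp1 (a :: t)).dropLast).mem_iff.mp he
        have he3 : e ∈ pvBp1 (a :: t) := (List.dropLast_sublist _).subset he2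
        have := pvBp1_last_ge a t e he3
        omega)]
      rfl

-- ---- the capped buffer ----

lemma pvInsEnd_take (s : List (Int × Int)) (x : Int × Int) (k : Nat) :
    (pvInsEnd (s.take k) x).take k = (pvInsEnd s x).take k := by
  induction s generalizing k with
  | nil => simp
  | cons y ys ih =>
    cases k with
    | zero => simp
    | succ k =>
      rw [List.take_succ_cons, pvInsEnd, pvInsEnd]
      split_ifs with h
      · rw [List.take_succ_cons, List.take_succ_cons]
        congr 1
        cases k with
        | zero => rfl
        | succ k' =>
          rw [List.take_succ_cons, List.take_succ_cons, List.take_take,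
            show min k' (k' + 1) = k' by omega]
      · rw [List.take_succ_cons, List.take_succ_cons, ih]

lemma pvIns3_small (s : List (Int × Int)) (x : Int × Int) :
    pvIns3 s x = (pvInsEnd s x).take 3 := by
  induction s with
  | nil => rfl
  | cons y ys ih =>
    rw [pvIns3, pvInsEnd]
    split_ifs with h1
    · rfl
    · rw [ih, List.take_succ_cons, List.take_succ_cons, List.take_take,
        show min 2 3 = 2 by omega]

lemma pvIns3_eq (s : List (Int × Int)) (x : Int × Int) :
    pvIns3 (s.take 3) x = (pvInsEnd s x).take 3 := by
  rw [pvIns3_small, pvInsEnd_take]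

lemma pvFoldIns3 (l : List (Int × Int)) (s : List (Int × Int)) :
    l.foldl pvIns3 (s.take 3) = (l.foldl pvInsEnd s).take 3 := by
  induction l generalizing s with
  | nil => rfl
  | cons x t ih => rw [List.foldl_cons, List.foldl_cons, pvIns3_eq, ih]

-- ---- the trend flags, combined ----

lemma pvFlagsEq (l : List Int) :
    l.foldl (fun (p : Bool × Bool) c =>
        (if c ≤ 0 then false else p.1, if c ≥ 0 then false else p.2)) (true, true)
      = (l.all (fun c => decide (0 < c)), l.all (fun c => decide (c < 0))) := by
  rw [PySem.List.foldl_prod_mk (f := fun ok (c : Int) => if c ≤ 0 then false else ok)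
    (g := fun ok (c : Int) => if c ≥ 0 then false else ok), pvFoldFlag1, pvFoldFlag2]
  simp

-- ===== VERDICT (by name: the statement is the Claim_ definition above) =====
theorem analyze_trend_basic_manual_spec : Claim_equal_analyze_trend_basic_manual := by
  intro npc data _ hpre
  obtain ⟨hne, -⟩ := hpre
  unfold Spec_analyze_trend_basic_manual analyze_trend_basic_manual analyze_trend_basic_manual_alt
  simp only [pvFlagsEq]
  cases npc with
  | nil => exact absurd rfl hne
  | cons x t =>
    by_cases hpos : (x :: t).all (fun c => decide (0 < c)) = true
    · rw [if_pos hpos, if_pos hpos, PySem.List.max?_id_cons]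
      simp only [Option.getD_some]
      have hmem : List.foldl max x t ∈ x :: t := by
        rcases PySem.List.foldl_max_mem t x with h | h
        · rw [h]; exact List.mem_cons_self
        · exact List.mem_cons_of_mem _ h
      rw [pvIndexMem hmem]
      simp only [Option.getD_some]
      rw [pvArgmaxFoldCons x t 0]
      by_cases hM : List.foldl max x t = x
      · rw [if_pos hM]
        simp only [hM, List.idxOf_cons, beq_self_eq_true, cond_true]
        norm_num
      · rw [if_neg hM]
        have hle : x ≤ List.foldl max x t := (PySem.List.le_foldl_max t x).1
        have hbeq : (x == List.foldl max x t) = false := by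
          simp only [beq_eq_false_iff_ne, ne_eq]; omega
        simp only [List.idxOf_cons, hbeq, cond_false]
        have harg : ((List.idxOf (List.foldl max x t) t + 1 : Nat) : Int) + 1
            = 0 + 1 + (List.idxOf (List.foldl max x t) t : Int) + 1 := by push_cast; ring
        rw [harg]
    · rw [if_neg hpos, if_neg hpos]
      by_cases hneg : (x :: t).all (fun c => decide (c < 0)) = true
      · rw [if_pos hneg, if_pos hneg, PySem.List.min?_id_cons]
        simp only [Option.getD_some]
        have hmem : List.foldl min x t ∈ x :: t := by
          rcases PySem.List.foldl_min_mem t x with h | h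
          · rw [h]; exact List.mem_cons_self
          · exact List.mem_cons_of_mem _ h
        rw [pvIndexMem hmem]
        simp only [Option.getD_some]
        rw [pvArgminFoldCons x t 0]
        by_cases hM : List.foldl min x t = x
        · rw [if_pos hM]
          simp only [hM, List.idxOf_cons, beq_self_eq_true, cond_true]
          norm_num
        · rw [if_neg hM]
          have hle : List.foldl min x t ≤ x := (PySem.List.foldl_min_le t x).1
          have hbeq : (x == List.foldl min x t) = false := by
            simp only [beq_eq_false_iff_ne, ne_eq]; omega
          simp only [List.idxOf_cons, hbeq, cond_false]
          have harg : ((List.idxOf (List.foldl min x t) t + 1 : Nat) : Int) + 1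
              = 0 + 1 + (List.idxOf (List.foldl min x t) t : Int) + 1 := by push_cast; ring
          rw [harg]
      · rw [if_neg hneg, if_neg hneg]
        rw [PySem.List.foldl_append_ite (p := fun ic : Int × Int => ic.2 < 0)
          (f := fun ic : Int × Int => (ic.2, pvDay data (ic.1 + 1)))]
        rw [List.nil_append]
        rw [PySem.List.foldl_ite_eq_foldl_filter (p := fun jc : Int × Int => jc.2 < 0)
          (f := fun (buf : List (Int × Int)) (jc : Int × Int) =>
            pvIns3 buf (jc.2, pvDay data (jc.1 + 1)))]
        rw [← List.foldl_map (f := fun jc : Int × Int => (jc.2, pvDay data (jc.1 + 1)))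
          (g := pvIns3)]
        rw [pvBubbleEq]
        conv_rhs => rw [show ([] : List (Int × Int)) = ([] : List (Int × Int)).take 3 from rfl]
        rw [pvFoldIns3]
        rfl
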